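-- pv_equiv track=rewrite | github.com/jakacibej/sikdd2024_predicting_pronunciation_types | scripts/SIKDD2024_13_train_final_model_on_entire_dataset.py | get_number_of_ngrams_within_lemma
-- ===== SOURCE A (Python) =====
-- def get_number_of_ngrams_within_lemma(string):
--     # GET NUMBER OF UNIGRAMS
--     nr_unigrams = len(list(string))
--     # GET NUMBER OF BIGRAMS
--     nr_bigrams = 0
--     for index, character in enumerate(list(string)):
--         try:
--             character_1 = character
--             character_2 = list(string)[index + 1]
--             nr_bigrams += 1
--         except:
--             continue
--     # GET NUMBER OF TRIGRAMS
--     nr_trigrams = 0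
--     for index, character in enumerate(list(string)):
--         try:
--             character_1 = character
--             character_2 = list(string)[index + 1]
--             character_3 = list(string)[index + 2]
--             nr_trigrams += 1
--         except:
--             continue
--
--     return nr_unigrams, nr_bigrams, nr_trigrams
-- ===== SOURCE B (Python) =====
-- def get_number_of_ngrams_within_lemma(string):
--     n = len(string)
--     return n, max(n - 1, 0), max(n - 2, 0)
-- ===== Notes on version B (the rewrite author's own statement) =====
-- stated objective: faster
-- what changed: Replaces A's two index-probing loops (each rebuilding list(string) per iteration) with the closed form n, max(n-1,0), max(n-2,0) computed directly from len(string).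
import Mathlib
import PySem

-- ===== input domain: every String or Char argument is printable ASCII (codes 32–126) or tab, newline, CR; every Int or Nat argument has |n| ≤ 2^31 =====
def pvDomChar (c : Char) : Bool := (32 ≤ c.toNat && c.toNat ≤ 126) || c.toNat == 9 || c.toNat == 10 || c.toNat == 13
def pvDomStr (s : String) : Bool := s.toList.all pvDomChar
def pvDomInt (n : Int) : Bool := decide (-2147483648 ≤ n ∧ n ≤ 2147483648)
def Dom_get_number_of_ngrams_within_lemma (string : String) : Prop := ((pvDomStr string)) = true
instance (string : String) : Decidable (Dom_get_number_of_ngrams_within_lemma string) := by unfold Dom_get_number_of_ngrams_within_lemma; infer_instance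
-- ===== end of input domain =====

-- B replaces A's two index-probing loops with the closed form n, max(n-1,0), max(n-2,0): asymptotically faster.

-- ===== PORT A =====
-- literal port: len(list(string)); one loop counting indices whose successor exists
-- (try/except IndexError ≡ pyGet? returning some/none); one loop needing two successors.
def get_number_of_ngrams_within_lemma (string : String) : List Int :=
  let l := string.toList
  let nr_unigrams : Int := PySem.List.len l
  let nr_bigrams : Int :=
    (PySem.List.enumerate l).foldl (fun acc p =>
      match PySem.List.pyGet? l (p.1 + 1) with
      | some _ => acc + 1
      | none => acc) 0
  let nr_trigrams : Int :=
    (PySem.List.enumerate l).foldl (fun acc p =>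
      match PySem.List.pyGet? l (p.1 + 1) with
      | none => acc
      | some _ =>
        match PySem.List.pyGet? l (p.1 + 2) with
        | some _ => acc + 1
        | none => acc) 0
  [nr_unigrams, nr_bigrams, nr_trigrams]

-- ===== PORT B =====
def get_number_of_ngrams_within_lemma_alt (string : String) : List Int :=
  let n : Int := PySem.Str.len string
  [n, max (n - 1) 0, max (n - 2) 0]

-- ===== PRECONDITION & SPEC =====
def Spec_get_number_of_ngrams_within_lemma (string : String) (out : List Int) : Prop := out = get_number_of_ngrams_within_lemma_alt string
instance (string : String) (out : List Int) : Decidable (Spec_get_number_of_ngrams_within_lemma string out) := by unfold Spec_get_number_of_ngrams_within_lemma; infer_instance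

-- ===== CLAIM (what is proved, stated in full; the proofs are below) =====
def Claim_equal_get_number_of_ngrams_within_lemma : Prop := ∀ (string : String), Dom_get_number_of_ngrams_within_lemma string → Spec_get_number_of_ngrams_within_lemma string (get_number_of_ngrams_within_lemma string)

-- ===== LEMMAS AND PROOFS =====

-- counting indices k ∈ [s, s+len) with k + d < N
theorem pv_enum_count (xs : List Char) (d N : Int) (s c : Int) :
    (PySem.List.enumerate xs s).foldl (fun acc p => if (p.1 + d < N) then acc + 1 else acc) c
      = c + min (xs.length : Int) (max (N - d - s) 0) := by
  induction xs generalizing s c with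
  | nil => simp [PySem.List.enumerate_nil]
  | cons x xs ih =>
    rw [PySem.List.enumerate_cons, List.foldl_cons, ih]
    simp only [List.length_cons]
    push_cast
    split_ifs <;> omega

theorem pv_bigram (l : List Char) :
    (PySem.List.enumerate l).foldl (fun acc p =>
      match PySem.List.pyGet? l (p.1 + 1) with
      | some _ => acc + 1
      | none => acc) 0 = max ((l.length : Int) - 1) 0 := by
  have hcongr : ∀ (acc : Int) (p : Int × Char), p ∈ PySem.List.enumerate l →
      (match PySem.List.pyGet? l (p.1 + 1) with
       | some _ => acc + 1
       | none => acc)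
      = (if (p.1 + 1 < (l.length : Int)) then acc + 1 else acc) := by
    intro acc p hp
    obtain ⟨k, hk, rfl⟩ := (PySem.List.mem_enumerate_iff l 0 p).1 hp
    rcases h : PySem.List.pyGet? l ((0 + (k : Int)) + 1) with _ | c
    · have hn := (PySem.List.pyGet?_eq_none_iff l ((0 + (k : Int)) + 1)).1 h
      simp only [PySem.Raise.InRange] at hn
      rw [if_neg (by omega)]
    · have hr : PySem.Raise.InRange l.length ((0 + (k : Int)) + 1) := by
        by_contra hc
        rw [(PySem.List.pyGet?_eq_none_iff l ((0 + (k : Int)) + 1)).2 hc] at h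
        simp at h
      simp only [PySem.Raise.InRange] at hr
      rw [if_pos (by omega)]
  have hfold := PySem.List.foldl_congr_mem (PySem.List.enumerate l) _ _ (0 : Int) hcongr
  rw [hfold, pv_enum_count l 1 (l.length : Int) 0 0]
  omega

theorem pv_trigram (l : List Char) :
    (PySem.List.enumerate l).foldl (fun acc p =>
      match PySem.List.pyGet? l (p.1 + 1) with
      | none => acc
      | some _ =>
        match PySem.List.pyGet? l (p.1 + 2) with
        | some _ => acc + 1
        | none => acc) 0 = max ((l.length : Int) - 2) 0 := by
  have hiff : ∀ (j : Int), 0 ≤ j →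
      (PySem.List.pyGet? l j = none ↔ ¬ (j < (l.length : Int))) := by
    intro j hj
    rw [PySem.List.pyGet?_eq_none_iff]
    simp only [PySem.Raise.InRange]
    constructor
    · intro h hlt; exact h ⟨by omega, hlt⟩
    · intro h hx; exact h hx.2
  have hcongr : ∀ (acc : Int) (p : Int × Char), p ∈ PySem.List.enumerate l →
      (match PySem.List.pyGet? l (p.1 + 1) with
       | none => acc
       | some _ =>
         match PySem.List.pyGet? l (p.1 + 2) with
         | some _ => acc + 1
         | none => acc)
      = (if (p.1 + 2 < (l.length : Int)) then acc + 1 else acc) := by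
    intro acc p hp
    obtain ⟨k, hk, rfl⟩ := (PySem.List.mem_enumerate_iff l 0 p).1 hp
    by_cases h2 : ((0 + (k : Int)) + 2 < (l.length : Int))
    · have h1 : ((0 + (k : Int)) + 1 < (l.length : Int)) := by omega
      rcases ha : PySem.List.pyGet? l ((0 + (k : Int)) + 1) with _ | c1
      · exact absurd h1 ((hiff _ (by positivity)).1 ha)
      rcases hb : PySem.List.pyGet? l ((0 + (k : Int)) + 2) with _ | c2
      · exact absurd h2 ((hiff _ (by positivity)).1 hb)
      rw [if_pos (by omega)]
    · rcases ha : PySem.List.pyGet? l ((0 + (k : Int)) + 1) with _ | c1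
      · rw [if_neg (by omega)]
      rcases hb : PySem.List.pyGet? l ((0 + (k : Int)) + 2) with _ | c2
      · rw [if_neg (by omega)]
      · exfalso
        have hx := (hiff ((0 + (k : Int)) + 2) (by positivity)).2 h2
        rw [hx] at hb
        simp at hb
  have hfold := PySem.List.foldl_congr_mem (PySem.List.enumerate l) _ _ (0 : Int) hcongr
  rw [hfold, pv_enum_count l 2 (l.length : Int) 0 0]
  omega

-- ===== VERDICT (by name: the statement is the Claim_ definition above) =====
theorem get_number_of_ngrams_within_lemma_spec : Claim_equal_get_number_of_ngrams_within_lemma := by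
  unfold Claim_equal_get_number_of_ngrams_within_lemma
  intro s _
  unfold Spec_get_number_of_ngrams_within_lemma
  unfold get_number_of_ngrams_within_lemma get_number_of_ngrams_within_lemma_alt
  simp only [pv_bigram, pv_trigram, PySem.List.len_eq, PySem.Str.len_eq]
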